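-- pv_equiv track=rewrite | github.com/GuilhermeBarros12/rag_aneel | scripts/chunking.py | proteger_tabelas
-- ===== SOURCE A (Python) =====
-- def proteger_tabelas(texto):
--     """
--     Detecta blocos de tabela Markdown (linhas que contêm "|")
--     e os substitui por placeholders __TABELA_0__, __TABELA_1__, etc.
--
--     Por quê? O splitter não sabe que uma tabela é uma unidade indivisível —
--     sem essa proteção ele poderia cortar a tabela no meio, gerando chunks inúteis.
--
--     Retorna:
--         texto_protegido  — texto com os placeholders no lugar das tabelas
--         tabelas          — dicionário { '__TABELA_0__': '<texto original>' }
--     """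
--
--     tabelas    = {}         # vai guardar o texto original de cada tabela
--     contador   = [0]        # lista com um inteiro (truque para modificar dentro da função interna)
--     linhas     = texto.split("\n")   # divide o texto em linhas individuais
--     resultado  = []         # vai acumular as linhas do texto final (com placeholders)
--     bloco      = []         # acumula as linhas do bloco de tabela sendo lido no momento
--
--     def fechar_bloco():
--         """Chamada quando o bloco de tabela terminou: salva e insere o placeholder."""
--         if bloco:                                           # só age se há algo no bloco
--             chave = f"__TABELA_{contador[0]}__"            # cria o nome do placeholder
--             tabelas[chave] = "\n".join(bloco)              # salva o texto original da tabela
--             resultado.append(chave)                        # insere o placeholder no texto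
--             bloco.clear()                                  # limpa o buffer do bloco
--             contador[0] += 1                               # incrementa o contador para a próxima tabela
--
--     for linha in linhas:            # percorre cada linha do texto
--         if "|" in linha:            # linha de tabela Markdown sempre tem "|"
--             bloco.append(linha)     # adiciona ao bloco de tabela em construção
--         else:
--             fechar_bloco()          # linha normal: fecha o bloco anterior (se havia um)
--             resultado.append(linha) # adiciona a linha normal ao resultado
--
--     fechar_bloco()   # fecha o último bloco, se o arquivo terminar com uma tabela
--
--     texto_protegido = "\n".join(resultado)   # remonta o texto com as linhas tratadas
--     return texto_protegido, tabelas          # retorna os dois valores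
-- ===== SOURCE B (Python) =====
-- def proteger_tabelas(texto):
--     """Run-based rewrite: scan maximal runs of table lines with an index
--     instead of a per-line buffer with a flush helper."""
--     linhas = texto.split("\n")
--     tabelas = {}
--     resultado = []
--     total = len(linhas)
--     i = 0
--     n = 0
--     while i < total:
--         linha = linhas[i]
--         if "|" in linha:
--             j = i + 1
--             while j < total and "|" in linhas[j]:
--                 j += 1
--             chave = f"__TABELA_{n}__"
--             tabelas[chave] = "\n".join(linhas[i:j])
--             resultado.append(chave)
--             n += 1
--             i = j
--         else:
--             resultado.append(linha)
--             i += 1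
--     return "\n".join(resultado), tabelas
-- ===== Notes on version B (the rewrite author's own statement) =====
-- stated objective: alternative
-- what changed: Replaces the per-line buffer plus flush-helper state machine with an index scan over maximal runs of table lines: each run is located with an inner scan, joined and replaced at once, and non-table lines are copied directly.
import Mathlib
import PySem

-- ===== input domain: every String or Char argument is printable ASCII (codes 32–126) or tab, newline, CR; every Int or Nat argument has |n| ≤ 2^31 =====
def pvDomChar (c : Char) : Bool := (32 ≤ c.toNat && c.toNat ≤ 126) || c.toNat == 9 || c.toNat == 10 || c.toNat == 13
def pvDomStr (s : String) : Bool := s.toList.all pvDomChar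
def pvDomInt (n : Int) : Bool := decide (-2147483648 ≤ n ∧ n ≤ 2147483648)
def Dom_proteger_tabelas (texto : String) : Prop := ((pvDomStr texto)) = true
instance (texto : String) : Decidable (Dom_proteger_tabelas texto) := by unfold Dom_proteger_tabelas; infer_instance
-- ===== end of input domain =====

-- B replaces A's per-line buffer + flush-helper state machine with a scan over
-- maximal runs of table lines (alternative decomposition, same cost).


-- ===== PORT A =====
-- A's inner helper `fechar_bloco`: flush the pending table block, if any.
def pvAFechar (st : PySem.Dict String String × Int × List String × List String) :
    PySem.Dict String String × Int × List String × List String :=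
  if st.2.2.2 = [] then st
  else
    let chave := "__TABELA_" ++ PySem.Int.toStr st.2.1 ++ "__"
    (PySem.Dict.insert st.1 chave (PySem.Str.join "\n" st.2.2.2),
     st.2.1 + 1, st.2.2.1 ++ [chave], [])

-- A's loop body over one line (state = (tabelas, contador, resultado, bloco)).
def pvAStep (st : PySem.Dict String String × Int × List String × List String)
    (linha : String) : PySem.Dict String String × Int × List String × List String :=
  if PySem.Str.isIn "|" linha then (st.1, st.2.1, st.2.2.1, st.2.2.2 ++ [linha])
  else
    let st' := pvAFechar st
    (st'.1, st'.2.1, st'.2.2.1 ++ [linha], st'.2.2.2)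

def proteger_tabelas (texto : String) : String × (List (String × String)) :=
  let linhas := (PySem.Chars.splitOn texto.toList "\n".toList).map String.ofList
  let st := linhas.foldl pvAStep (PySem.Dict.empty, 0, [], [])
  let stf := pvAFechar st
  (PySem.Str.join "\n" stf.2.2.1, stf.1.items)

-- ===== PORT B =====
-- B's outer while loop: at a table line, the inner while scans the maximal run
-- (takeWhile/dropWhile), which is joined and replaced by one placeholder.
def pvBRuns : List String → Int → List String × List (String × String)
  | [], _ => ([], [])
  | l :: ls, n =>
    if PySem.Str.isIn "|" l then
      let run := l :: ls.takeWhile (fun x => PySem.Str.isIn "|" x)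
      let rest := ls.dropWhile (fun x => PySem.Str.isIn "|" x)
      let chave := "__TABELA_" ++ PySem.Int.toStr n ++ "__"
      let pr := pvBRuns rest (n + 1)
      (chave :: pr.1, (chave, PySem.Str.join "\n" run) :: pr.2)
    else
      let pr := pvBRuns ls n
      (l :: pr.1, pr.2)
  termination_by ls _ => ls.length
  decreasing_by
  · have := List.length_dropWhile_le (fun x => PySem.Str.isIn "|" x) ls
    simp only [List.length_cons]; omega
  · simp only [List.length_cons]; omega

def proteger_tabelas_alt (texto : String) : String × (List (String × String)) :=
  let pr := pvBRuns ((PySem.Chars.splitOn texto.toList "\n".toList).map String.ofList) 0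
  (PySem.Str.join "\n" pr.1, pr.2)

-- ===== PRECONDITION & SPEC =====
def Spec_proteger_tabelas (texto : String) (out : String × (List (String × String))) : Prop := out = proteger_tabelas_alt texto
instance (texto : String) (out : String × (List (String × String))) : Decidable (Spec_proteger_tabelas texto out) := by unfold Spec_proteger_tabelas; infer_instance

-- ===== CLAIM (what is proved, stated in full; the proofs are below) =====
def Claim_equal_proteger_tabelas : Prop := ∀ (texto : String), Dom_proteger_tabelas texto → Spec_proteger_tabelas texto (proteger_tabelas texto)

-- ===== LEMMAS AND PROOFS =====

-- The placeholder key, as both ports build it.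
def pvKey (n : Int) : String := "__TABELA_" ++ PySem.Int.toStr n ++ "__"

lemma pvDigitChar_inj {a b : ℕ} (ha : a < 10) (hb : b < 10)
    (h : Nat.digitChar a = Nat.digitChar b) : a = b := by
  interval_cases a <;> interval_cases b <;> simp_all [Nat.digitChar]

lemma pvToDigitsCore_eq (n : ℕ) : 0 < n → ∀ f acc, n < f →
    Nat.toDigitsCore 10 f n acc = ((Nat.digits 10 n).map Nat.digitChar).reverse ++ acc := by
  induction n using Nat.strong_induction_on with
  | _ n IH =>
    intro hn f acc hf
    match f with
    | 0 => omega
    | f + 1 =>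
      rw [Nat.digits_def' (by norm_num : 1 < 10) hn]
      by_cases h0 : n / 10 = 0
      · simp [Nat.toDigitsCore, h0]
      · have hlt : n / 10 < n := Nat.div_lt_self hn (by norm_num)
        simp only [Nat.toDigitsCore, h0, if_false]
        rw [IH (n / 10) hlt (Nat.pos_of_ne_zero h0) f _ (by omega)]
        simp

lemma pvToDigits_eq (n : ℕ) :
    Nat.toDigits 10 n = if n = 0 then ['0'] else ((Nat.digits 10 n).map Nat.digitChar).reverse := by
  by_cases h : n = 0
  · subst h; rfl
  · rw [if_neg h]
    have := pvToDigitsCore_eq n (Nat.pos_of_ne_zero h) (n + 1) [] (by omega)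
    simpa [Nat.toDigits] using this

lemma pvMapDC_inj : ∀ (l1 l2 : List ℕ), (∀ x ∈ l1, x < 10) → (∀ x ∈ l2, x < 10) →
    l1.map Nat.digitChar = l2.map Nat.digitChar → l1 = l2
  | [], [], _, _, _ => rfl
  | [], _ :: _, _, _, h => by simp at h
  | _ :: _, [], _, _, h => by simp at h
  | a :: l1, b :: l2, h1, h2, h => by
    simp only [List.map_cons, List.cons.injEq] at h
    have hd := pvDigitChar_inj (h1 a (by simp)) (h2 b (by simp)) h.1
    have tl := pvMapDC_inj l1 l2 (fun x hx => h1 x (by simp [hx])) (fun x hx => h2 x (by simp [hx])) h.2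
    rw [hd, tl]

lemma pvNotZeroDigits {k : ℕ} (hk : k ≠ 0)
    (h : ((Nat.digits 10 k).map Nat.digitChar).reverse = ['0']) : False := by
  have hrev : (Nat.digits 10 k).map Nat.digitChar = ['0'] := by
    have := congrArg List.reverse h
    simpa using this
  obtain ⟨d, hd, hdc⟩ : ∃ d, Nat.digits 10 k = [d] ∧ Nat.digitChar d = '0' := by
    match hds : Nat.digits 10 k with
    | [] => rw [hds] at hrev; simp at hrev
    | [d] => rw [hds] at hrev; simp at hrev; exact ⟨d, rfl, hrev⟩
    | _ :: _ :: _ => rw [hds] at hrev; simp at hrev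
  have hlt : d < 10 := Nat.digits_lt_base (by norm_num) (by rw [hd]; simp)
  have hd0 : d = 0 := pvDigitChar_inj hlt (by norm_num) (by simpa using hdc)
  have hof := Nat.ofDigits_digits 10 k
  rw [hd, hd0] at hof
  simp [Nat.ofDigits] at hof
  exact hk hof.symm

lemma pvToDigits10_inj {m k : ℕ} (h : Nat.toDigits 10 m = Nat.toDigits 10 k) : m = k := by
  rw [pvToDigits_eq, pvToDigits_eq] at h
  by_cases hm : m = 0 <;> by_cases hk : k = 0
  · omega
  · rw [if_pos hm, if_neg hk] at h; exact absurd h.symm (fun hh => pvNotZeroDigits hk hh)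
  · rw [if_neg hm, if_pos hk] at h; exact absurd h (fun hh => pvNotZeroDigits hm hh)
  · rw [if_neg hm, if_neg hk] at h
    have h2 : (Nat.digits 10 m).map Nat.digitChar = (Nat.digits 10 k).map Nat.digitChar :=
      List.reverse_inj.mp h
    have hdig : Nat.digits 10 m = Nat.digits 10 k :=
      pvMapDC_inj _ _ (fun x hx => Nat.digits_lt_base (by norm_num) hx)
        (fun x hx => Nat.digits_lt_base (by norm_num) hx) h2
    calc m = Nat.ofDigits 10 (Nat.digits 10 m) := (Nat.ofDigits_digits 10 m).symm
    _ = Nat.ofDigits 10 (Nat.digits 10 k) := by rw [hdig]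
    _ = k := Nat.ofDigits_digits 10 k

lemma pvKey_inj {m k : Int} (hm : 0 ≤ m) (hk : 0 ≤ k) (h : pvKey m = pvKey k) : m = k := by
  unfold pvKey at h
  rw [← String.toList_inj] at h
  simp only [String.toList_append, PySem.Int.toList_toStr] at h
  rw [List.append_assoc, List.append_assoc] at h
  have h1 : PySem.Int.toChars m ++ "__".toList = PySem.Int.toChars k ++ "__".toList :=
    List.append_cancel_left h
  have h2 : PySem.Int.toChars m = PySem.Int.toChars k := List.append_cancel_right h1
  unfold PySem.Int.toChars at h2
  rw [if_neg (by omega), if_neg (by omega)] at h2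
  have := pvToDigits10_inj h2
  omega

-- fresh-key invariant carried through A's loop
def pvFresh (tabs : PySem.Dict String String) (cnt : Int) : Prop :=
  ∀ m : Int, cnt ≤ m → tabs.contains (pvKey m) = false

lemma pvAFechar_idem (st) : pvAFechar (pvAFechar st) = pvAFechar st := by
  obtain ⟨t, c, r, b⟩ := st
  by_cases hb : b = [] <;> simp [pvAFechar, hb]

lemma pvAStep_fechar (st) (r : String) (h : PySem.Str.isIn "|" r = false) :
    pvAStep (pvAFechar st) r = pvAStep st r := by
  have h' : PySem.Chars.isIn ['|'] r.toList = false := by simpa using h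
  simp [pvAStep, h', pvAFechar_idem]

lemma pvRun_accum : ∀ (t : List String), (∀ x ∈ t, PySem.Str.isIn "|" x = true) →
    ∀ (rest : List String) st,
      (t ++ rest).foldl pvAStep st
        = rest.foldl pvAStep (st.1, st.2.1, st.2.2.1, st.2.2.2 ++ t) := by
  intro t
  induction t with
  | nil => intro _ rest st; simp
  | cons x t IH =>
    intro h rest st
    have hx : PySem.Chars.isIn ['|'] x.toList = true := by simpa using h x (by simp)
    have ht : ∀ y ∈ t, PySem.Str.isIn "|" y = true := fun y hy => h y (by simp [hy])
    simp only [List.cons_append, List.foldl_cons]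
    have step : pvAStep st x = (st.1, st.2.1, st.2.2.1, st.2.2.2 ++ [x]) := by
      simp [pvAStep, hx]
    rw [step, IH ht rest]
    simp [List.append_assoc]


lemma pvFlush_boundary (rest : List String)
    (h : ∀ r, rest.head? = some r → PySem.Str.isIn "|" r = false) (st) :
    pvAFechar (rest.foldl pvAStep st) = pvAFechar (rest.foldl pvAStep (pvAFechar st)) := by
  match rest with
  | [] => simp [pvAFechar_idem]
  | r :: rest' =>
    have hr : PySem.Str.isIn "|" r = false := h r rfl
    simp only [List.foldl_cons]
    rw [pvAStep_fechar st r hr]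

lemma pvMain (ls : List String) (tabs : PySem.Dict String String) (cnt : Int)
    (res : List String) (hc : 0 ≤ cnt) (hf : pvFresh tabs cnt) :
    ((pvAFechar (ls.foldl pvAStep (tabs, cnt, res, []))).2.2.1,
     (pvAFechar (ls.foldl pvAStep (tabs, cnt, res, []))).1.items)
      = (res ++ (pvBRuns ls cnt).1, tabs.items ++ (pvBRuns ls cnt).2) := by
  have H : ∀ (N : ℕ) (ls : List String) (tabs : PySem.Dict String String) (cnt : Int)
      (res : List String), ls.length ≤ N → 0 ≤ cnt → pvFresh tabs cnt →
      ((pvAFechar (ls.foldl pvAStep (tabs, cnt, res, []))).2.2.1,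
       (pvAFechar (ls.foldl pvAStep (tabs, cnt, res, []))).1.items)
        = (res ++ (pvBRuns ls cnt).1, tabs.items ++ (pvBRuns ls cnt).2) := by
    intro N
    induction N with
    | zero =>
      intro ls tabs cnt res hN _ _
      have : ls = [] := List.eq_nil_of_length_eq_zero (by omega)
      subst this
      simp [pvBRuns, pvAFechar]
    | succ N IH =>
      intro ls tabs cnt res hN hc hf
      match ls with
      | [] => simp [pvBRuns, pvAFechar]
      | l :: ls' =>
        by_cases hl : PySem.Str.isIn "|" l = true
        · -- table run
          set t := ls'.takeWhile (fun x => PySem.Str.isIn "|" x) with htdef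
          set d := ls'.dropWhile (fun x => PySem.Str.isIn "|" x) with hddef
          have htd : t ++ d = ls' := List.takeWhile_append_dropWhile
          have hall : ∀ x ∈ l :: t, PySem.Str.isIn "|" x = true := by
            intro x hx
            rcases List.mem_cons.mp hx with h' | h'
            · subst h'; exact hl
            · exact List.mem_takeWhile_imp h'
          have hsplit : l :: ls' = (l :: t) ++ d := by simp [htd]
          have hdhead : ∀ r, d.head? = some r → PySem.Str.isIn "|" r = false := by
            intro r hr
            have hh := List.head?_dropWhile_not (fun x => PySem.Str.isIn "|" x) ls'
            rw [← hddef, hr] at hh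
            simpa using hh
          have hB : pvBRuns (l :: ls') cnt
              = (pvKey cnt :: (pvBRuns d (cnt + 1)).1,
                 (pvKey cnt, PySem.Str.join "\n" (l :: t)) :: (pvBRuns d (cnt + 1)).2) := by
            rw [pvBRuns]
            simp only [hl, if_true, ← htdef, ← hddef, pvKey]
          rw [hB, hsplit, pvRun_accum (l :: t) hall d (tabs, cnt, res, [])]
          simp only [List.nil_append]
          rw [pvFlush_boundary d hdhead (tabs, cnt, res, l :: t)]
          have hflush : pvAFechar (tabs, cnt, res, l :: t)
              = (PySem.Dict.insert tabs (pvKey cnt) (PySem.Str.join "\n" (l :: t)),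
                 cnt + 1, res ++ [pvKey cnt], []) := by
            simp [pvAFechar, pvKey]
          rw [hflush]
          have hfresh' : pvFresh (PySem.Dict.insert tabs (pvKey cnt)
              (PySem.Str.join "\n" (l :: t))) (cnt + 1) := by
            intro m hm
            rw [PySem.Dict.contains_insert]
            have hne : pvKey m ≠ pvKey cnt := by
              intro he
              have := pvKey_inj (by omega) hc he
              omega
            simp only [beq_eq_false_iff_ne, Bool.or_eq_false_iff]
            exact ⟨hne, hf m (by omega)⟩
          have hdlen : d.length ≤ N := by
            have h1 : d.length ≤ ls'.length := List.length_dropWhile_le _ _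
            simp only [List.length_cons] at hN
            omega
          have hIH := IH d _ (cnt + 1) (res ++ [pvKey cnt]) hdlen (by omega) hfresh'
          have hitems : (PySem.Dict.insert tabs (pvKey cnt)
              (PySem.Str.join "\n" (l :: t))).items
              = tabs.items ++ [(pvKey cnt, PySem.Str.join "\n" (l :: t))] :=
            PySem.Dict.items_insert_of_not_contains tabs _ (hf cnt le_rfl)
          rw [Prod.ext_iff] at hIH ⊢
          obtain ⟨hIH1, hIH2⟩ := hIH
          simp only at hIH1 hIH2
          constructor
          · simp [hIH1, List.append_assoc]
          · simp [hIH2, hitems, List.append_assoc]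
        · -- plain line
          have hl' : PySem.Str.isIn "|" l = false := by simpa using hl
          have hl2 : PySem.Chars.isIn ['|'] l.toList = false := by simpa using hl'
          have hstep : pvAStep (tabs, cnt, res, []) l = (tabs, cnt, res ++ [l], []) := by
            simp [pvAStep, hl2, pvAFechar]
          simp only [List.foldl_cons, hstep]
          have hIH := IH ls' tabs cnt (res ++ [l])
            (by simp only [List.length_cons] at hN; omega) hc hf
          have hB : pvBRuns (l :: ls') cnt
              = (l :: (pvBRuns ls' cnt).1, (pvBRuns ls' cnt).2) := by
            rw [pvBRuns]; simp [hl2]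
          rw [hB]
          rw [Prod.ext_iff] at hIH ⊢
          obtain ⟨hIH1, hIH2⟩ := hIH
          simp only at hIH1 hIH2
          constructor
          · simp [hIH1, List.append_assoc]
          · simpa using hIH2
  exact H ls.length ls tabs cnt res le_rfl hc hf

-- ===== VERDICT (by name: the statement is the Claim_ definition above) =====
theorem proteger_tabelas_spec : Claim_equal_proteger_tabelas := by
  intro texto _
  show proteger_tabelas texto = proteger_tabelas_alt texto
  have h := pvMain ((PySem.Chars.splitOn texto.toList "\n".toList).map String.ofList)
    PySem.Dict.empty 0 [] le_rfl (fun m _ => PySem.Dict.contains_empty _)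
  have h1 := congrArg Prod.fst h
  have h2 := congrArg Prod.snd h
  simp only [List.nil_append] at h1 h2
  exact Prod.ext (congrArg (PySem.Str.join "\n") h1) h2
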